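-- pv_equiv track=rewrite | github.com/duckycodess/cs12labexercises | cs12232lab01d.py | fifth_fury
-- ===== SOURCE A (Python) =====
-- def fifth_fury(p: list[int]) -> list[int]:
--     n: int = len(p)
--     e: list[int] = [-1] * n
--
--     sp = sorted([(p[i], i) for i in range(len(p))])
--     for i in range(len(sp)):
--         value, original_index = sp[i]
--
--         l, r = 0, n - 1
--
--         for _ in range(5):
--             if l < i:
--                 abs_l = abs(value - sp[l][0])
--
--                 if r > i:
--                     abs_r = abs(value - sp[r][0])
--                     if abs_l >= abs_r:
--                         e[original_index] = abs_l
--                         l += 1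
--                     else:
--                         e[original_index] = abs_r
--                         r -= 1
--                 else:
--                     e[original_index] = abs_l
--                     l += 1
--             elif r > i:
--                 e[original_index] = abs(value - sp[r][0])
--                 r -= 1
--             else:
--                 break
--     return e
-- ===== SOURCE B (Python) =====
-- def fifth_fury(p: list[int]) -> list[int]:
--     out: list[int] = []
--     for j, x in enumerate(p):
--         diffs = sorted((abs(x - y) for k, y in enumerate(p) if k != j), reverse=True)
--         out.append(diffs[min(4, len(diffs) - 1)] if diffs else -1)
--     return out
-- ===== Notes on version B (the rewrite author's own statement) =====
-- stated objective: simpler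
-- what changed: Replaces A's global (value,index) sort with a five-iteration two-pointer greedy selection writing into a shared result array by an independent per-element descending sort of absolute differences indexed at min(4, len-1).
import Mathlib
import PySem

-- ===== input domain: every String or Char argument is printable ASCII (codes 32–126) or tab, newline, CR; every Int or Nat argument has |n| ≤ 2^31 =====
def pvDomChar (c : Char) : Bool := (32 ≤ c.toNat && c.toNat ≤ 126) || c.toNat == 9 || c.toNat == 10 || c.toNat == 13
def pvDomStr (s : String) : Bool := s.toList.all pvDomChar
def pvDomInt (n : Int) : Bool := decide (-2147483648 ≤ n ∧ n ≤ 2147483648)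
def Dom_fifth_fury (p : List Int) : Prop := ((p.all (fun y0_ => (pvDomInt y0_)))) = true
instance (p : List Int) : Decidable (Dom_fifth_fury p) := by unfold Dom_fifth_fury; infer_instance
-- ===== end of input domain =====

-- B replaces A's global sort + five-step two-pointer selection by an independent
-- per-element descending sort of absolute differences indexed at min(4, len-1) (objective: simpler).

-- ===== PORT A =====
-- inner 'for _ in range(5)' loop with break, threading e and the pointers l, r
def ffInner (sp : List (Int × Nat)) (value : Int) (oi i : Nat) :
    Nat → Nat → Nat → List Int → List Int
  | 0, _, _, e => e
  | fuel+1, l, r, e =>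
    if l < i then
      if i < r then
        if |value - (sp.getD r (0, 0)).1| ≤ |value - (sp.getD l (0, 0)).1| then
          ffInner sp value oi i fuel (l+1) r (e.set oi (|value - (sp.getD l (0, 0)).1|))
        else
          ffInner sp value oi i fuel l (r-1) (e.set oi (|value - (sp.getD r (0, 0)).1|))
      else
        ffInner sp value oi i fuel (l+1) r (e.set oi (|value - (sp.getD l (0, 0)).1|))
    else if i < r then
      ffInner sp value oi i fuel l (r-1) (e.set oi (|value - (sp.getD r (0, 0)).1|))
    else e

def fifth_fury (p : List Int) : List Int :=
  let n := p.length
  let e : List Int := List.replicate n (-1)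
  let sp := PySem.List.sorted2 ((List.range p.length).map (fun i => (p.getD i 0, i)))
      (fun t => t.1) (fun t => t.2)
  (List.range sp.length).foldl
    (fun e i => ffInner sp (sp.getD i (0, 0)).1 (sp.getD i (0, 0)).2 i 5 0 (n-1) e) e

-- ===== PORT B =====
def fifth_fury_alt (p : List Int) : List Int :=
  (PySem.List.enumerate p).map (fun jx =>
    let diffs := PySem.List.sorted
      (((PySem.List.enumerate p).filter (fun ky => ky.1 != jx.1)).map (fun ky => |jx.2 - ky.2|))
      (fun d => d) true
    if diffs = [] then -1 else diffs.getD (min 4 (diffs.length - 1)) 0)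

-- ===== PRECONDITION & SPEC =====
def Spec_fifth_fury (p : List Int) (out : List Int) : Prop := out = fifth_fury_alt p
instance (p : List Int) (out : List Int) : Decidable (Spec_fifth_fury p out) := by unfold Spec_fifth_fury; infer_instance

-- ===== CLAIM (what is proved, stated in full; the proofs are below) =====
def Claim_equal_fifth_fury : Prop := ∀ (p : List Int), Dom_fifth_fury p → Spec_fifth_fury p (fifth_fury p)

-- ===== LEMMAS AND PROOFS =====

def ffP (p : List Int) : List (Int × Nat) := (List.range p.length).map (fun i => (p.getD i 0, i))
def ffd (sp : List (Int × Nat)) (value : Int) (k : Nat) : Int := |value - (sp.getD k (0, 0)).1|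
def ffL (sp : List (Int × Nat)) (value : Int) (i l : Nat) : List Int :=
  (List.range' l (i - l)).map (ffd sp value)
def ffR (sp : List (Int × Nat)) (value : Int) (i r : Nat) : List Int :=
  ((List.range' (i+1) (r - i)).map (ffd sp value)).reverse

def mtake : Nat → List Int → List Int → List Int
  | 0, _, _ => []
  | _+1, [], [] => []
  | f+1, a :: L, [] => a :: mtake f L []
  | f+1, [], b :: R => b :: mtake f [] R
  | f+1, a :: L, b :: R =>
    if b ≤ a then a :: mtake f L (b :: R) else b :: mtake f (a :: L) R

theorem ffL_cons (sp value i l) (h : l < i) :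
    ffL sp value i l = ffd sp value l :: ffL sp value i (l+1) := by
  unfold ffL
  have : i - l = (i - (l+1)) + 1 := by omega
  rw [this, List.range'_succ]
  simp

theorem ffL_nil (sp value i l) (h : i ≤ l) : ffL sp value i l = [] := by
  unfold ffL; have : i - l = 0 := by omega
  simp [this]

theorem ffR_cons (sp value i r) (h : i < r) :
    ffR sp value i r = ffd sp value r :: ffR sp value i (r-1) := by
  unfold ffR
  have h1 : r - i = ((r-1) - i) + 1 := by omega
  rw [h1, List.range'_concat]
  have h2 : i + 1 + 1 * (r - 1 - i) = r := by omega
  rw [h2]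
  simp

theorem ffR_nil (sp value i r) (h : r ≤ i) : ffR sp value i r = [] := by
  unfold ffR; have : r - i = 0 := by omega
  simp [this]

theorem mcombine (e : List Int) (oi : Nat) (a : Int) (ps : List Int) :
    (if ps = [] then e.set oi a else (e.set oi a).set oi (ps.getLast?.getD 0)) =
    (if (a :: ps : List Int) = [] then e else e.set oi ((a :: ps).getLast?.getD 0)) := by
  cases ps with
  | nil => simp
  | cons b t => simp [List.set_set, List.getLast?_cons_cons]

theorem inner_eq (sp : List (Int × Nat)) (value : Int) (oi i : Nat) :
    ∀ (fuel l r : Nat) (e : List Int), l ≤ i → i ≤ r →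
    ffInner sp value oi i fuel l r e =
      (if mtake fuel (ffL sp value i l) (ffR sp value i r) = [] then e
       else e.set oi ((mtake fuel (ffL sp value i l) (ffR sp value i r)).getLast?.getD 0)) := by
  intro fuel
  induction fuel with
  | zero => intro l r e _ _; simp [ffInner, mtake]
  | succ f ih =>
    intro l r e hl hr
    by_cases h1 : l < i
    · rw [ffL_cons sp value i l h1]
      by_cases h2 : i < r
      · rw [ffR_cons sp value i r h2]
        by_cases h3 : |value - (sp.getD r (0, 0)).1| ≤ |value - (sp.getD l (0, 0)).1|
        · have hstep : ffInner sp value oi i (f+1) l r e =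
            ffInner sp value oi i f (l+1) r (e.set oi (|value - (sp.getD l (0, 0)).1|)) := by
            conv_lhs => rw [ffInner]
            rw [if_pos h1, if_pos h2, if_pos h3]
          rw [hstep, ih (l+1) r _ (by omega) hr,
            ffR_cons sp value i r h2]
          have hm : mtake (f+1) (ffd sp value l :: ffL sp value i (l+1))
              (ffd sp value r :: ffR sp value i (r-1)) =
              ffd sp value l :: mtake f (ffL sp value i (l+1)) (ffd sp value r :: ffR sp value i (r-1)) := by
            rw [mtake]; rw [if_pos (show ffd sp value r ≤ ffd sp value l from h3)]
          rw [hm, ← ffR_cons sp value i r h2, ← mcombine]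
          rfl
        · have hstep : ffInner sp value oi i (f+1) l r e =
            ffInner sp value oi i f l (r-1) (e.set oi (|value - (sp.getD r (0, 0)).1|)) := by
            conv_lhs => rw [ffInner]
            rw [if_pos h1, if_pos h2, if_neg h3]
          rw [hstep, ih l (r-1) _ hl (by omega),
            ffL_cons sp value i l h1]
          have hm : mtake (f+1) (ffd sp value l :: ffL sp value i (l+1))
              (ffd sp value r :: ffR sp value i (r-1)) =
              ffd sp value r :: mtake f (ffd sp value l :: ffL sp value i (l+1)) (ffR sp value i (r-1)) := by
            rw [mtake]; rw [if_neg (show ¬ ffd sp value r ≤ ffd sp value l from h3)]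
          rw [hm, ← ffL_cons sp value i l h1, ← mcombine]
          rfl
      · have hre : r = i := by omega
        have hstep : ffInner sp value oi i (f+1) l r e =
            ffInner sp value oi i f (l+1) r (e.set oi (|value - (sp.getD l (0, 0)).1|)) := by
          conv_lhs => rw [ffInner]
          rw [if_pos h1, if_neg h2]
        rw [hstep, ih (l+1) r _ (by omega) hr,
          ffR_nil sp value i r (by omega)]
        have hm : mtake (f+1) (ffd sp value l :: ffL sp value i (l+1)) ([] : List Int) =
            ffd sp value l :: mtake f (ffL sp value i (l+1)) [] := by
          rw [mtake]
        rw [hm, ← mcombine]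
        rfl
    · rw [ffL_nil sp value i l (by omega)]
      by_cases h2 : i < r
      · rw [ffR_cons sp value i r h2]
        have hstep : ffInner sp value oi i (f+1) l r e =
            ffInner sp value oi i f l (r-1) (e.set oi (|value - (sp.getD r (0, 0)).1|)) := by
          conv_lhs => rw [ffInner]
          rw [if_neg h1, if_pos h2]
        rw [hstep, ih l (r-1) _ hl (by omega),
          ffL_nil sp value i l (by omega)]
        have hm : mtake (f+1) ([] : List Int) (ffd sp value r :: ffR sp value i (r-1)) =
            ffd sp value r :: mtake f [] (ffR sp value i (r-1)) := by
          rw [mtake]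
        rw [hm, ← mcombine]
        rfl
      · rw [ffR_nil sp value i r (by omega)]
        have hstep : ffInner sp value oi i (f+1) l r e = e := by
          conv_lhs => rw [ffInner]
          rw [if_neg h1, if_neg h2]
        rw [hstep]
        simp [mtake]


theorem pairwise_fst_insertBy (before : Int × Nat → Int × Nat → Bool)
    (h1 : ∀ a b, before a b = true → a.1 ≤ b.1)
    (h2 : ∀ a b, before a b = false → b.1 ≤ a.1)
    (x : Int × Nat) :
    ∀ (ys : List (Int × Nat)), ys.Pairwise (fun a b => a.1 ≤ b.1) →
      (PySem.List.insertBy before x ys).Pairwise (fun a b => a.1 ≤ b.1) := by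
  intro ys
  induction ys with
  | nil => intro _; simp [PySem.List.insertBy]
  | cons y t ih =>
    intro hp
    rw [List.pairwise_cons] at hp
    rw [PySem.List.insertBy]
    by_cases hb : before x y = true
    · rw [if_pos hb]
      refine List.Pairwise.cons ?_ (List.Pairwise.cons hp.1 hp.2)
      intro z hz
      rcases List.mem_cons.mp hz with h | h
      · exact h ▸ h1 x y hb
      · exact le_trans (h1 x y hb) (hp.1 z h)
    · rw [if_neg hb]
      refine List.Pairwise.cons ?_ (ih hp.2)
      intro z hz
      rcases (PySem.List.mem_insertBy (before := before) (x := x) (ys := t) (y := z)).mp hz with h | h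
      · exact h ▸ h2 x y (by simpa using hb)
      · exact hp.1 z h
    
theorem sorted2_pairwise_fst (xs : List (Int × Nat)) :
    (PySem.List.sorted2 xs (fun t => t.1) (fun t => t.2)).Pairwise (fun a b => a.1 ≤ b.1) := by
  rw [PySem.List.sorted2]
  simp only [if_neg (by decide : ¬ (false = true))]
  have key : ∀ (l : List (Int × Nat)) (acc : List (Int × Nat)),
      acc.Pairwise (fun a b => a.1 ≤ b.1) →
      (l.foldl (fun acc x => PySem.List.insertBy
        (fun a b => decide (a.1 < b.1) || !decide (b.1 < a.1) && decide (a.2 < b.2)) x acc) acc).Pairwise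
        (fun a b => a.1 ≤ b.1) := by
    intro l
    induction l with
    | nil => intro acc h; simpa using h
    | cons x t ih =>
      intro acc h
      simp only [List.foldl_cons]
      exact ih _ (pairwise_fst_insertBy _
        (by intro a b hb; simp at hb; rcases hb with h | h; exacts [le_of_lt h, h.1])
        (by intro a b hb; simp at hb; exact hb.1)
        x acc h)
  exact key xs [] (by simp)


theorem foldl_set_length (σ : Nat → Nat) (f : Nat → Int) :
    ∀ (t : List Nat) (e : List Int),
      (t.foldl (fun e i => e.set (σ i) (f i)) e).length = e.length := by
  intro t
  induction t with
  | nil => intro e; rfl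
  | cons a t ih => intro e; simp [ih]

theorem foldl_set_not_mem (σ : Nat → Nat) (f : Nat → Int) :
    ∀ (t : List Nat) (e : List Int) (j : Nat), j ∉ t.map σ →
      (t.foldl (fun e i => e.set (σ i) (f i)) e)[j]? = e[j]? := by
  intro t
  induction t with
  | nil => intro e j _; rfl
  | cons a t ih =>
    intro e j hj
    simp only [List.map_cons, List.mem_cons] at hj
    push_neg at hj
    simp only [List.foldl_cons]
    rw [ih _ j hj.2, List.getElem?_set_ne (fun h => hj.1 h.symm)]

theorem foldl_set_mem (σ : Nat → Nat) (f : Nat → Int) :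
    ∀ (t : List Nat) (e : List Int) (i0 : Nat), i0 ∈ t → (t.map σ).Nodup →
      σ i0 < e.length →
      (t.foldl (fun e i => e.set (σ i) (f i)) e)[σ i0]? = some (f i0) := by
  intro t
  induction t with
  | nil => intro e i0 h; simp at h
  | cons a t ih =>
    intro e i0 hmem hnd hlt
    simp only [List.map_cons, List.nodup_cons] at hnd
    simp only [List.foldl_cons]
    by_cases hi : i0 ∈ t
    · exact ih _ i0 hi hnd.2 (by simpa using hlt)
    · have ha : i0 = a := by rcases List.mem_cons.mp hmem with h | h; exacts [h, absurd h hi]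
      subst ha
      rw [foldl_set_not_mem σ f t _ _ hnd.1]
      exact List.getElem?_set_self hlt

theorem last_take_five (xs : List Int) (h : xs ≠ []) :
    ((xs.take 5).getLast?).getD 0 = xs.getD (min 4 (xs.length - 1)) 0 := by
  have hlen : 1 ≤ xs.length := List.length_pos_iff.mpr h
  rw [List.getLast?_eq_getElem?, List.getD_eq_getElem?_getD, List.length_take]
  rw [List.getElem?_take]
  have he : min 5 xs.length - 1 = min 4 (xs.length - 1) := by omega
  rw [if_pos (by omega), he]

-- filtered enumerate = eraseIdx
theorem filter_enumerate_eraseIdx :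
    ∀ (xs : List Int) (s : Int) (j : Nat), j < xs.length →
      (((PySem.List.enumerate xs s).filter (fun ky => ky.1 != s + (j : Int))).map (fun ky => ky.2))
        = xs.eraseIdx j := by
  intro xs
  induction xs with
  | nil => intro s j h; simp at h
  | cons x t ih =>
    intro s j hj
    cases j with
    | zero =>
      rw [PySem.List.enumerate_cons]
      simp only [List.filter_cons]
      have : ((s, x).1 != s + ((0:Nat) : Int)) = false := by simp
      rw [this]
      have hall : ∀ ky ∈ PySem.List.enumerate t (s+1), (ky.1 != s + ((0:Nat):Int)) = true := by
        intro ky hky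
        rcases (PySem.List.mem_enumerate_iff t (s+1) ky).mp hky with ⟨k, hk, rfl⟩
        simp; omega
      rw [List.filter_eq_self.mpr hall]
      simpa using PySem.List.map_snd_enumerate t (s+1)
    | succ j' =>
      rw [PySem.List.enumerate_cons]
      simp only [List.filter_cons]
      have : ((s, x).1 != s + ((j'+1 : Nat) : Int)) = true := by simp; omega
      rw [this, if_pos rfl]
      simp only [List.map_cons, List.eraseIdx_cons_succ]
      have hih := ih (s+1) j' (by simpa using Nat.lt_of_succ_lt_succ hj)
      rw [show s + ((j'+1 : Nat) : Int) = s + 1 + (j' : Int) by push_cast; ring, hih]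


theorem getD_eq_getElem_of_lt (sp : List (Int × Nat)) (a : Nat) (h : a < sp.length) :
    sp.getD a (0, 0) = sp[a] := by
  rw [List.getD_eq_getElem?_getD, List.getElem?_eq_getElem h]; rfl

-- monotone values in getD form
theorem pw_getD (sp : List (Int × Nat)) (hpw : sp.Pairwise (fun a b => a.1 ≤ b.1)) :
    ∀ a b : Nat, a ≤ b → b < sp.length → (sp.getD a (0, 0)).1 ≤ (sp.getD b (0, 0)).1 := by
  intro a b hab hb
  rcases Nat.eq_or_lt_of_le hab with h | h
  · subst h; exact le_refl _
  · rw [getD_eq_getElem_of_lt sp a (by omega), getD_eq_getElem_of_lt sp b hb]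
    exact (List.pairwise_iff_getElem.mp hpw) a b (by omega) hb h

theorem ffL_pairwise (sp : List (Int × Nat)) (value : Int) (i : Nat)
    (hpw : sp.Pairwise (fun a b => a.1 ≤ b.1)) (hi : i < sp.length)
    (hv : value = (sp.getD i (0, 0)).1) :
    (ffL sp value i 0).Pairwise (fun a b => b ≤ a) := by
  unfold ffL
  rw [List.pairwise_map]
  refine (List.pairwise_lt_range' (s := 0) (n := i - 0) 1).imp_of_mem ?_
  intro a b ha hb hab
  rw [List.mem_range'_1] at ha hb
  have hva : (sp.getD a (0,0)).1 ≤ (sp.getD b (0,0)).1 := pw_getD sp hpw a b (by omega) (by omega)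
  have hvb : (sp.getD b (0,0)).1 ≤ value := hv ▸ pw_getD sp hpw b i (by omega) hi
  unfold ffd
  rw [abs_of_nonneg (by omega), abs_of_nonneg (by omega)]
  omega

theorem ffR_pairwise (sp : List (Int × Nat)) (value : Int) (i r : Nat)
    (hpw : sp.Pairwise (fun a b => a.1 ≤ b.1)) (hr : r < sp.length)
    (hv : value = (sp.getD i (0, 0)).1) :
    (ffR sp value i r).Pairwise (fun a b => b ≤ a) := by
  unfold ffR
  rw [List.pairwise_reverse, List.pairwise_map]
  refine (List.pairwise_lt_range' (s := i+1) (n := r - i) 1).imp_of_mem ?_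
  intro a b ha hb hab
  rw [List.mem_range'_1] at ha hb
  have hva : (sp.getD a (0,0)).1 ≤ (sp.getD b (0,0)).1 := pw_getD sp hpw a b (by omega) (by omega)
  have hvb : value ≤ (sp.getD a (0,0)).1 := hv ▸ pw_getD sp hpw i a (by omega) (by omega)
  unfold ffd
  rw [abs_of_nonpos (by omega), abs_of_nonpos (by omega)]
  omega

theorem ffL_eq_map_take (sp : List (Int × Nat)) (value : Int) (i : Nat) (hi : i ≤ sp.length) :
    ffL sp value i 0 = (sp.take i).map (fun t => |value - t.1|) := by
  apply List.ext_getElem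
  · simp [ffL]; omega
  · intro k h1 h2
    simp only [ffL, List.getElem_map, List.getElem_range'_1, List.getElem_take]
    unfold ffd
    rw [getD_eq_getElem_of_lt sp _ (by simp [ffL] at h1; omega)]
    simp

theorem ffR_eq_map_drop (sp : List (Int × Nat)) (value : Int) (i : Nat) (hi : i < sp.length) :
    ffR sp value i (sp.length - 1) = ((sp.drop (i+1)).map (fun t => |value - t.1|)).reverse := by
  unfold ffR
  congr 1
  apply List.ext_getElem
  · simp; omega
  · intro k h1 h2
    simp only [List.getElem_map, List.getElem_range'_1, List.getElem_drop]
    unfold ffd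
    rw [getD_eq_getElem_of_lt sp _ (by simp at h1; omega)]

theorem map_fst_ffP (p : List Int) : (ffP p).map (fun t => t.1) = p := by
  apply List.ext_getElem
  · simp [ffP]
  · intro k h1 h2
    simp only [ffP, List.getElem_map, List.getElem_range]
    rw [List.getD_eq_getElem?_getD, List.getElem?_eq_getElem h2]; rfl

theorem cons_eraseIdx_perm {α : Type} (l : List α) (i : Nat) (h : i < l.length) :
    l.Perm (l[i] :: l.eraseIdx i) := by
  conv_lhs => rw [← List.take_append_drop i l, ← List.getElem_cons_drop h]
  rw [List.eraseIdx_eq_take_drop_succ]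
  exact List.perm_middle

theorem fst_eraseIdx_perm (p : List Int) (sp : List (Int × Nat))
    (hperm : sp.Perm (ffP p)) (i0 j : Nat) (hi0 : i0 < sp.length)
    (hsp_i : sp[i0] = (p.getD j 0, j)) (hj : j < p.length) :
    ((sp.eraseIdx i0).map (fun t => t.1)).Perm (p.eraseIdx j) := by
  have h1 : (sp.map (fun t => t.1)).Perm p := by
    have := hperm.map (fun t : Int × Nat => t.1)
    rwa [map_fst_ffP p] at this
  have h2 : (sp.map (fun t => t.1)).Perm
      (p.getD j 0 :: (sp.eraseIdx i0).map (fun t => t.1)) := by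
    have := (cons_eraseIdx_perm sp i0 hi0).map (fun t : Int × Nat => t.1)
    simpa [hsp_i] using this
  have h3 : p.Perm (p.getD j 0 :: p.eraseIdx j) := by
    rw [show p.getD j 0 = p[j] by rw [List.getD_eq_getElem?_getD, List.getElem?_eq_getElem hj]; rfl]
    exact cons_eraseIdx_perm p j hj
  exact (List.Perm.cons_inv ((h2.symm.trans h1).trans h3))

theorem mtake_eq_take_merge : ∀ (f : Nat) (L R : List Int),
    mtake f L R = (L.merge R (fun a b => decide (b ≤ a))).take f := by
  intro f
  induction f with
  | zero => intro L R; simp [mtake]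
  | succ f ih =>
    intro L R
    match L, R with
    | [], [] => simp [mtake]
    | a :: L, [] => simp [mtake, ih]
    | [], b :: R => simp [mtake, ih]
    | a :: L, b :: R =>
      rw [List.cons_merge_cons]
      by_cases h : b ≤ a
      · simp [mtake, h, ih]
      · simp [mtake, h, ih]

theorem payload (p : List Int) (sp : List (Int × Nat))
    (hlen : sp.length = p.length)
    (hpw : sp.Pairwise (fun a b => a.1 ≤ b.1))
    (hperm : sp.Perm (ffP p))
    (i0 j : Nat) (hi0 : i0 < sp.length) (hsp_i : sp[i0] = (p.getD j 0, j))
    (hj : j < p.length) (hn2 : 2 ≤ p.length) :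
    mtake 5 (ffL sp (p.getD j 0) i0 0) (ffR sp (p.getD j 0) i0 (p.length - 1)) ≠ [] ∧
    (mtake 5 (ffL sp (p.getD j 0) i0 0) (ffR sp (p.getD j 0) i0 (p.length - 1))).getLast?.getD 0
      = (fun diffs => diffs.getD (min 4 (diffs.length - 1)) 0)
          (PySem.List.sorted ((p.eraseIdx j).map (fun y => |p.getD j 0 - y|)) (fun d => d) true) := by
  set v := p.getD j 0 with hvdef
  have hv : v = (sp.getD i0 (0, 0)).1 := by
    rw [getD_eq_getElem_of_lt sp i0 hi0, hsp_i]
  set D : List Int := (p.eraseIdx j).map (fun y => |v - y|) with hD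
  set diffs := PySem.List.sorted D (fun d => d) true with hdiffs
  set L := ffL sp v i0 0 with hLdef
  set R := ffR sp v i0 (p.length - 1) with hRdef
  have hLpw : L.Pairwise (fun a b => b ≤ a) := ffL_pairwise sp v i0 hpw hi0 hv
  have hRpw : R.Pairwise (fun a b => b ≤ a) := by
    rw [hRdef, ← hlen]
    exact ffR_pairwise sp v i0 (sp.length - 1) hpw (by omega) hv
  set M := L.merge R (fun a b => decide (b ≤ a)) with hM
  have hMpw : M.Pairwise (fun a b => b ≤ a) := List.Pairwise.merge hLpw hRpw
  have happ : (L ++ R).Perm D := by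
    rw [hLdef, hRdef, ← hlen, ffL_eq_map_take sp v i0 (le_of_lt hi0),
      ffR_eq_map_drop sp v i0 hi0]
    refine List.Perm.trans (List.Perm.append_left _ (List.reverse_perm _)) ?_
    rw [← List.map_append, ← List.eraseIdx_eq_take_drop_succ]
    have h5 : ((sp.eraseIdx i0).map (fun t => t.1)).Perm (p.eraseIdx j) :=
      fst_eraseIdx_perm p sp hperm i0 j hi0 hsp_i hj
    have := h5.map (fun y => |v - y|)
    rw [List.map_map] at this
    exact this
  have hMperm : M.Perm D := (List.merge_perm_append _).trans happ
  have hMeq : M = diffs := by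
    refine List.Perm.eq_of_pairwise ?_ hMpw ?_ (hMperm.trans (PySem.List.sorted_perm D (fun d => d) true).symm)
    · intro a b _ _ h1 h2; omega
    · have := PySem.List.sorted_pairwise_rev D (fun d => d)
      simpa using this
  have hDlen : D.length = p.length - 1 := by
    rw [hD, List.length_map, List.length_eraseIdx]
    simp [hj]
  have hdiffs_len : diffs.length = p.length - 1 := by
    rw [hdiffs, PySem.List.length_sorted, hDlen]
  have hdne : diffs ≠ [] := by
    intro h
    rw [h] at hdiffs_len
    simp at hdiffs_len
    omega
  have hm5 : mtake 5 L R = diffs.take 5 := by rw [mtake_eq_take_merge, ← hM, hMeq]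
  constructor
  · rw [hm5]
    apply List.ne_nil_of_length_pos
    rw [List.length_take]
    have : 0 < diffs.length := by omega
    omega
  · rw [hm5]
    exact last_take_five diffs hdne



def ffSP (p : List Int) : List (Int × Nat) :=
  PySem.List.sorted2 (ffP p) (fun t => t.1) (fun t => t.2)
def ffSig (p : List Int) (i : Nat) : Nat := ((ffSP p).getD i (0, 0)).2
def ffF (p : List Int) (i : Nat) : Int :=
  (mtake 5 (ffL (ffSP p) (p.getD (ffSig p i) 0) i 0)
    (ffR (ffSP p) (p.getD (ffSig p i) 0) i (p.length - 1))).getLast?.getD 0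

theorem sp_perm (p : List Int) : (ffSP p).Perm (ffP p) :=
  PySem.List.sorted2_perm _ _ _ _

theorem sp_len (p : List Int) : (ffSP p).length = p.length := by
  rw [(sp_perm p).length_eq]; simp [ffP]

theorem sp_shape (p : List Int) (i : Nat) (h : i < (ffSP p).length) :
    (ffSP p).getD i (0, 0) = (p.getD (ffSig p i) 0, ffSig p i) ∧ ffSig p i < p.length := by
  have hm : (ffSP p)[i] ∈ ffP p := (sp_perm p).mem_iff.mp (List.getElem_mem h)
  simp only [ffP, List.mem_map, List.mem_range] at hm
  obtain ⟨k, hk, hke⟩ := hm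
  have hgd : (ffSP p).getD i (0, 0) = (ffSP p)[i] := getD_eq_getElem_of_lt _ i h
  have hsig : ffSig p i = k := by rw [ffSig, hgd, ← hke]
  refine ⟨?_, by omega⟩
  rw [hgd, ← hke, hsig]

theorem a_eq_fold (p : List Int) (hn2 : 2 ≤ p.length) :
    fifth_fury p = (List.range (ffSP p).length).foldl
      (fun e i => e.set (ffSig p i) (ffF p i)) (List.replicate p.length (-1)) := by
  show (List.range (ffSP p).length).foldl
      (fun e i => ffInner (ffSP p) ((ffSP p).getD i (0, 0)).1 ((ffSP p).getD i (0, 0)).2 i 5 0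
        (p.length - 1) e) (List.replicate p.length (-1)) = _
  refine PySem.List.foldl_congr_mem _ _ _ _ ?_
  intro e i hi
  rw [List.mem_range] at hi
  obtain ⟨hsh, hslt⟩ := sp_shape p i hi
  have hval : ((ffSP p).getD i (0, 0)).1 = p.getD (ffSig p i) 0 := by rw [hsh]
  have hoi : ((ffSP p).getD i (0, 0)).2 = ffSig p i := by rw [ffSig]
  have hpay := payload p (ffSP p) (sp_len p) (sorted2_pairwise_fst (ffP p)) (sp_perm p)
    i (ffSig p i) hi (by rw [← getD_eq_getElem_of_lt _ i hi, hsh]) hslt hn2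
  rw [inner_eq (ffSP p) _ _ i 5 0 (p.length - 1) e (Nat.zero_le i) (by have := sp_len p; omega)]
  rw [hval, hoi, if_neg hpay.1, ffF]

theorem map_sig_range (p : List Int) :
    ((List.range (ffSP p).length).map (ffSig p)).Nodup := by
  have he : (List.range (ffSP p).length).map (ffSig p) = (ffSP p).map (fun t => t.2) := by
    apply List.ext_getElem
    · simp
    · intro k h1 h2
      simp only [List.getElem_map, List.getElem_range]
      rw [ffSig, getD_eq_getElem_of_lt _ k (by simpa using h2)]
  rw [he]
  have hp : ((ffSP p).map (fun t => t.2)).Perm ((ffP p).map (fun t => t.2)) := (sp_perm p).map _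
  have he2 : (ffP p).map (fun t => t.2) = List.range p.length := by
    apply List.ext_getElem
    · simp [ffP]
    · intro k h1 h2; simp [ffP]
  rw [he2] at hp
  exact hp.nodup_iff.mpr (List.nodup_range)

theorem alt_getElem (p : List Int) (jj : Nat) (hjj : jj < p.length) (hn2 : 2 ≤ p.length) :
    (fifth_fury_alt p)[jj]? = some ((fun diffs => diffs.getD (min 4 (diffs.length - 1)) 0)
      (PySem.List.sorted ((p.eraseIdx jj).map (fun y => |p.getD jj 0 - y|)) (fun d => d) true)) := by
  rw [fifth_fury_alt, List.getElem?_map, PySem.List.getElem?_enumerate,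
    List.getElem?_eq_getElem hjj]
  simp only [Option.map_some]
  have hfm : ((PySem.List.enumerate p 0).filter (fun ky => ky.1 != ((0 : Int) + (jj : Int), p[jj]).1)).map
      (fun ky => |((0 : Int) + (jj : Int), p[jj]).2 - ky.2|)
      = (p.eraseIdx jj).map (fun y => |p.getD jj 0 - y|) := by
    have hf := filter_enumerate_eraseIdx p 0 jj hjj
    have hpj : p.getD jj 0 = p[jj] := by
      rw [List.getD_eq_getElem?_getD, List.getElem?_eq_getElem hjj]; rfl
    rw [← hf, List.map_map, hpj]
    rfl
  rw [hfm]
  have hlen : ((p.eraseIdx jj).map (fun y => |p.getD jj 0 - y|)).length = p.length - 1 := by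
    rw [List.length_map, List.length_eraseIdx]; simp [hjj]
  rw [if_neg (by
    intro h
    rw [PySem.List.sorted_eq_nil_iff] at h
    rw [h] at hlen
    simp at hlen
    omega)]

theorem main_case (p : List Int) (hn2 : 2 ≤ p.length) :
    fifth_fury p = fifth_fury_alt p := by
  apply List.ext_getElem?
  intro jj
  by_cases hjj : jj < p.length
  · have hmem : (p.getD jj 0, jj) ∈ ffSP p :=
      (sp_perm p).mem_iff.mpr (by
        simp only [ffP, List.mem_map, List.mem_range]
        exact ⟨jj, hjj, rfl⟩)
    obtain ⟨i0, hi0, hsp_i0⟩ := List.mem_iff_getElem.mp hmem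
    have hsig0 : ffSig p i0 = jj := by
      rw [ffSig, getD_eq_getElem_of_lt _ i0 hi0, hsp_i0]
    have hAj : (fifth_fury p)[jj]? = some (ffF p i0) := by
      rw [a_eq_fold p hn2, ← hsig0]
      exact foldl_set_mem (ffSig p) (ffF p) (List.range (ffSP p).length) _ i0
        (List.mem_range.mpr hi0) (map_sig_range p)
        (by rw [hsig0, List.length_replicate]; omega)
    rw [hAj, alt_getElem p jj hjj hn2]
    congr 1
    have hpay := payload p (ffSP p) (sp_len p) (sorted2_pairwise_fst (ffP p)) (sp_perm p)
      i0 jj hi0 hsp_i0 hjj hn2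
    rw [ffF, hsig0]
    exact hpay.2
  · rw [List.getElem?_eq_none, List.getElem?_eq_none]
    · rw [fifth_fury_alt, List.length_map, PySem.List.length_enumerate]; omega
    · rw [a_eq_fold p hn2, foldl_set_length, List.length_replicate]; omega

-- ===== VERDICT (by name: the statement is the Claim_ definition above) =====
theorem fifth_fury_spec : Claim_equal_fifth_fury := by
  intro p _
  unfold Spec_fifth_fury
  match p with
  | [] => rfl
  | [x] => rfl
  | x :: y :: t => exact main_case (x :: y :: t) (by simp)
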